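-- pv_equiv track=rewrite | github.com/bgoonz/UsefulResourceRepo2.0 | _PYTHON/DATA_STRUC_PYTHON_NOTES/python-prac/projecteuler/euler053_combinatoric_selections.py | combinations_greater
-- ===== SOURCE A (Python) =====
-- from math import factorial
--
-- def combinations_greater(nlimit, target_max):
--     result = []
--     for n in range(1, nlimit + 1):
--         for r in range(2, n):
--             combinations = factorial(n) // (factorial(r) * factorial(n - r))
--             if combinations > target_max:
--                 result.append((n, r, combinations))
--     return result
-- ===== SOURCE B (Python) =====
-- def combinations_greater(nlimit, target_max):
--     result = []
--     row = [1]  # Pascal's triangle row for n = 0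
--     for n in range(1, nlimit + 1):
--         row = [1] + [a + b for a, b in zip(row, row[1:])] + [1]
--         for r in range(2, n):
--             c = row[r]
--             if c > target_max:
--                 result.append((n, r, c))
--     return result
-- ===== Notes on version B (the rewrite author's own statement) =====
-- stated objective: faster
-- what changed: Replaces per-(n,r) factorial computation with one incrementally updated Pascal's-triangle row per n, so each binomial is a single addition instead of three factorials and a bigint division.
import Mathlib
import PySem

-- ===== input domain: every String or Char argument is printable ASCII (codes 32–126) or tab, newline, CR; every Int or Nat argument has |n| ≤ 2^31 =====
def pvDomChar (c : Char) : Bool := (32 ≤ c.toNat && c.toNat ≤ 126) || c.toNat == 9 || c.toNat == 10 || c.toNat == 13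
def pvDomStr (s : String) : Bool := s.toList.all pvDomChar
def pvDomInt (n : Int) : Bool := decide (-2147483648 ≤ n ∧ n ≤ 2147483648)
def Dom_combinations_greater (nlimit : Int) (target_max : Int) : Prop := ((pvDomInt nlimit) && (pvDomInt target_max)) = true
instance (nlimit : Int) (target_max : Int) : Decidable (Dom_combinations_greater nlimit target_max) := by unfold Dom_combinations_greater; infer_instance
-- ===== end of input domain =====

-- B replaces the per-(n,r) factorial formula for C(n,r) by an incrementally updated
-- Pascal's-triangle row (one addition per entry), a faster exact re-implementation.

-- ===== PORT A =====
-- math.factorial; exact here since it is only applied to nonnegative arguments (n ≥ 1, 2 ≤ r < n)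
def pvFact (n : Int) : Int := Int.ofNat (Nat.factorial n.toNat)

def combinations_greater (nlimit : Int) (target_max : Int) : List (List Int) :=
  (PySem.List.pyRange 1 (nlimit + 1) 1).foldl
    (fun result n =>
      (PySem.List.pyRange 2 n 1).foldl
        (fun result r =>
          let combinations := PySem.Int.floordiv (pvFact n) (pvFact r * pvFact (n - r))
          if combinations > target_max then result ++ [[n, r, combinations]] else result)
        result)
    []

-- ===== PORT B =====
-- row = [1] + [a + b for a, b in zip(row, row[1:])] + [1]
def pvNextRow (row : List Int) : List Int :=
  [1] ++ List.zipWith (· + ·) row row.tail ++ [1]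

def combinations_greater_alt (nlimit : Int) (target_max : Int) : List (List Int) :=
  ((PySem.List.pyRange 1 (nlimit + 1) 1).foldl
    (fun (st : List Int × List (List Int)) n =>
      let row := pvNextRow st.1
      let result := (PySem.List.pyRange 2 n 1).foldl
        (fun result r =>
          -- row[r]: always in range (2 ≤ r < n, row has length n+1), so pyGetD is exact
          let c := PySem.List.pyGetD row r 0
          if c > target_max then result ++ [[n, r, c]] else result)
        st.2
      (row, result))
    ([1], [])).2

-- ===== PRECONDITION & SPEC =====
def Spec_combinations_greater (nlimit : Int) (target_max : Int) (out : List (List Int)) : Prop := out = combinations_greater_alt nlimit target_max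
instance (nlimit : Int) (target_max : Int) (out : List (List Int)) : Decidable (Spec_combinations_greater nlimit target_max out) := by unfold Spec_combinations_greater; infer_instance

-- ===== CLAIM (what is proved, stated in full; the proofs are below) =====
def Claim_equal_combinations_greater : Prop := ∀ (nlimit : Int) (target_max : Int), Dom_combinations_greater nlimit target_max → Spec_combinations_greater nlimit target_max (combinations_greater nlimit target_max)

-- ===== LEMMAS AND PROOFS =====

-- Row n of Pascal's triangle: [C(n,0), …, C(n,n)]
def pvPascal (m : Nat) : List Int := (List.range (m+1)).map (fun k => ((m.choose k : Nat) : Int))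

lemma pascal_next (m : Nat) : pvNextRow (pvPascal m) = pvPascal (m+1) := by
  have hz : (List.zipWith (fun x1 x2 => x1 + x2) (pvPascal m) (pvPascal m).tail).length = m := by
    simp [pvPascal]
  apply List.ext_getElem
  · simp [pvNextRow, pvPascal]
  · intro i h1 h2
    have h2m : i < m + 2 := by simp [pvPascal] at h2; omega
    simp only [pvNextRow, List.getElem_append, List.length_append, hz, List.length_singleton]
    rw [show (pvPascal (m+1))[i]'h2 = (((m+1).choose i : Nat) : Int) from by simp [pvPascal]]
    by_cases hA : i < 1 + m
    · rw [dif_pos hA]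
      by_cases hB : i < 1
      · rw [dif_pos hB]
        have : i = 0 := by omega
        subst this; simp
      · rw [dif_neg hB]
        rw [List.getElem_zipWith]
        have e1 : (pvPascal m)[i-1]'(by simp [pvPascal]; omega) = ((m.choose (i-1) : Nat) : Int) := by
          simp [pvPascal]
        have e2 : ((pvPascal m).tail)[i-1]'(by simp [pvPascal]; omega) = ((m.choose i : Nat) : Int) := by
          rw [List.getElem_tail]
          have : i - 1 + 1 = i := by omega
          simp_rw [this]
          simp [pvPascal]
        rw [e1, e2]
        have : i = (i-1) + 1 := by omega
        rw [this, Nat.choose_succ_succ]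
        push_cast; ring
    · rw [dif_neg hA]
      have : i = m + 1 := by omega
      subst this
      simp

-- A's factorial formula computes the binomial coefficient
lemma valA_eq (n r : Int) (h2 : 2 ≤ r) (h3 : r < n) :
    PySem.Int.floordiv (pvFact n) (pvFact r * pvFact (n - r))
      = ((n.toNat.choose r.toNat : Nat) : Int) := by
  have hsub : (n - r).toNat = n.toNat - r.toNat := by omega
  have hr : r.toNat ≤ n.toNat := by omega
  have hm : pvFact r * pvFact (n - r)
      = ((r.toNat.factorial * (n.toNat - r.toNat).factorial : Nat) : Int) := by
    simp [pvFact, hsub]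
  rw [hm]
  have := PySem.Int.floordiv_natCast (n.toNat.factorial) (r.toNat.factorial * (n.toNat - r.toNat).factorial)
  simp only [pvFact]
  rw [show (Int.ofNat n.toNat.factorial) = ((n.toNat.factorial : Nat) : Int) from rfl, this]
  rw [← Nat.choose_eq_factorial_div_factorial hr]

-- B's row lookup computes the binomial coefficient
lemma pascal_get (m : Nat) (r : Int) (h0 : 0 ≤ r) (h1 : r < m + 1) :
    PySem.List.pyGetD (pvPascal m) r 0 = ((m.choose r.toNat : Nat) : Int) := by
  rw [PySem.List.pyGetD_eq_getElem (pvPascal m) 0 h0 (by simp [pvPascal]; omega)]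
  simp [pvPascal]

-- what either inner loop appends for a given n
def pvSpec (tm n : Int) : List (List Int) :=
  ((PySem.List.pyRange 2 n 1).filter
      (fun r => decide (((n.toNat.choose r.toNat : Nat) : Int) > tm))).map
    (fun r => [n, r, ((n.toNat.choose r.toNat : Nat) : Int)])

lemma innerA (tm n : Int) (res : List (List Int)) :
    (PySem.List.pyRange 2 n 1).foldl
      (fun result r =>
        if PySem.Int.floordiv (pvFact n) (pvFact r * pvFact (n - r)) > tm then
          result ++ [[n, r, PySem.Int.floordiv (pvFact n) (pvFact r * pvFact (n - r))]]
        else result)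
      res = res ++ pvSpec tm n := by
  rw [PySem.List.foldl_congr_mem _ _
      (fun result r =>
        if (fun r : Int => decide (((n.toNat.choose r.toNat : Nat) : Int) > tm)) r = true then
          result ++ [[n, r, ((n.toNat.choose r.toNat : Nat) : Int)]] else result) _
      ?_]
  · rw [PySem.List.foldl_append_if]
    rfl
  · intro acc r hmem
    obtain ⟨hr2, hrn⟩ := (PySem.List.mem_pyRange_one).mp hmem
    simp only [valA_eq n r hr2 hrn, decide_eq_true_eq]

lemma innerB (tm n : Int) (res : List (List Int)) :
    (PySem.List.pyRange 2 n 1).foldl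
      (fun result r =>
        if PySem.List.pyGetD (pvPascal n.toNat) r 0 > tm then
          result ++ [[n, r, PySem.List.pyGetD (pvPascal n.toNat) r 0]]
        else result)
      res = res ++ pvSpec tm n := by
  rw [PySem.List.foldl_congr_mem _ _
      (fun result r =>
        if (fun r : Int => decide (((n.toNat.choose r.toNat : Nat) : Int) > tm)) r = true then
          result ++ [[n, r, ((n.toNat.choose r.toNat : Nat) : Int)]] else result) _
      ?_]
  · rw [PySem.List.foldl_append_if]
    rfl
  · intro acc r hmem
    obtain ⟨hr2, hrn⟩ := (PySem.List.mem_pyRange_one).mp hmem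
    have hget : PySem.List.pyGetD (pvPascal n.toNat) r 0 = ((n.toNat.choose r.toNat : Nat) : Int) :=
      pascal_get n.toNat r (by omega) (by omega)
    simp only [hget, decide_eq_true_eq]

-- loop invariant of B: the carried row is the Pascal row of the last processed n
lemma B_loop (tm : Int) (k : Nat) : ∀ (a : Int), 0 ≤ a → ∀ (res : List (List Int)),
    ((PySem.List.pyRange (a+1) (a+1+k) 1).foldl
      (fun (st : List Int × List (List Int)) n =>
        (pvNextRow st.1,
          (PySem.List.pyRange 2 n 1).foldl
            (fun result r =>
              if PySem.List.pyGetD (pvNextRow st.1) r 0 > tm then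
                result ++ [[n, r, PySem.List.pyGetD (pvNextRow st.1) r 0]]
              else result) st.2))
      (pvPascal a.toNat, res)).2
    = res ++ (PySem.List.pyRange (a+1) (a+1+k) 1).flatMap (pvSpec tm) := by
  induction k with
  | zero =>
      intro a ha res
      rw [PySem.List.pyRange_one_eq_nil (by push_cast; omega)]
      simp
  | succ k ih =>
      intro a ha res
      rw [PySem.List.pyRange_one_cons (by push_cast; omega : a + 1 < a + 1 + ((k+1 : Nat) : Int))]
      simp only [List.foldl_cons, List.flatMap_cons]
      have hrow : pvNextRow (pvPascal a.toNat) = pvPascal ((a+1).toNat) := by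
        rw [pascal_next]; congr 1; omega
      rw [hrow, innerB tm (a+1) res]
      rw [show a + 1 + ((k+1 : Nat) : Int) = (a+1) + 1 + (k : Int) from by push_cast; ring]
      rw [ih (a+1) (by omega) (res ++ pvSpec tm (a+1))]
      simp [List.append_assoc]

lemma A_eq (nl tm : Int) :
    combinations_greater nl tm = (PySem.List.pyRange 1 (nl+1) 1).flatMap (pvSpec tm) := by
  unfold combinations_greater
  rw [PySem.List.foldl_congr_mem _ _ (fun result n => result ++ pvSpec tm n) _
      (fun acc n _ => innerA tm n acc)]
  rw [PySem.List.foldl_append_eq_flatMap]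
  simp

lemma B_eq (nl tm : Int) :
    combinations_greater_alt nl tm = (PySem.List.pyRange 1 (nl+1) 1).flatMap (pvSpec tm) := by
  unfold combinations_greater_alt
  by_cases h : nl ≤ 0
  · rw [PySem.List.pyRange_one_eq_nil (by omega)]
    simp
  · have hloop := B_loop tm nl.toNat 0 (by omega) []
    rw [show (0:Int) + 1 + (nl.toNat : Int) = nl + 1 from by omega] at hloop
    norm_num at hloop
    exact hloop

-- ===== VERDICT (by name: the statement is the Claim_ definition above) =====
theorem combinations_greater_spec : Claim_equal_combinations_greater := by
  intro nlimit target_max _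
  unfold Spec_combinations_greater
  rw [A_eq, B_eq]
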